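-- pv_equiv track=rewrite | github.com/matthewnbrown/roc-cluster | api/job_manager.py | _summarize_send_credits_results
-- ===== SOURCE A (Python) =====
-- from typing import List, Dict, Any, Optional
--
-- def _summarize_send_credits_results(successful_results: List[Dict]) -> Dict[str, Any]:
--     """Summarize send credits action results"""
--     summary = {
--         "credits_sent": 0,
--         "jackpot_credits": 0,
--         "transfers_successful": 0,
--         "transfers_failed": 0,
--         "total_retries": 0
--     }
--
--     for result in successful_results:
--         result_data = result.get("result", {})
--         if isinstance(result_data, dict):
--             summary["total_retries"] += result_data.get("retries", 0)
--             if result_data.get("success"):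
--                 summary["transfers_successful"] += 1
--                 summary["credits_sent"] += result_data.get("credits_sent", 0)
--                 summary["jackpot_credits"] += result_data.get("jackpot_credits", 0)
--             else:
--                 summary["transfers_failed"] += 1
--
--     return summary
-- ===== SOURCE B (Python) =====
-- def _summarize_send_credits_results(successful_results):
--     """Summarize send credits action results (partition-then-aggregate)."""
--     valid = [rd for r in successful_results
--              if isinstance(rd := r.get("result", {}), dict)]
--     successes = [d for d in valid if d.get("success")]
--     return {
--         "credits_sent": sum(d.get("credits_sent", 0) for d in successes),
--         "jackpot_credits": sum(d.get("jackpot_credits", 0) for d in successes),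
--         "transfers_successful": len(successes),
--         "transfers_failed": len(valid) - len(successes),
--         "total_retries": sum(d.get("retries", 0) for d in valid),
--     }
-- ===== Notes on version B (the rewrite author's own statement) =====
-- stated objective: simpler
-- what changed: Replaces the single interleaved loop mutating five counters with a partition-then-aggregate: materialize the result dicts, filter the successes, and build the summary dict directly from lengths and sums.
import Mathlib
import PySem

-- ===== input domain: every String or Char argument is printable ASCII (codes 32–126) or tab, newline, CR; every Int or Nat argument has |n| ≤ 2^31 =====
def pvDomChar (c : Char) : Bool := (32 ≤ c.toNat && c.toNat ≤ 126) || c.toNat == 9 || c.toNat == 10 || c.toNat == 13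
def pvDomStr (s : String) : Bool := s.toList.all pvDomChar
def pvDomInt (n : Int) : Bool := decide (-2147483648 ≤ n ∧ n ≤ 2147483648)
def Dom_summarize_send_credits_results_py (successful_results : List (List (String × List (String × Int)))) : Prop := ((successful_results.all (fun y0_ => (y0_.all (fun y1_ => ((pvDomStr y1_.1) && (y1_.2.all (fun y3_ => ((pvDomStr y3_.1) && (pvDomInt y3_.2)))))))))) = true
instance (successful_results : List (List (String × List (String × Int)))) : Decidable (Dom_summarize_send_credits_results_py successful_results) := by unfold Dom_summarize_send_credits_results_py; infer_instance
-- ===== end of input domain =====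

-- B replaces A's single interleaved five-counter loop by partition-then-aggregate; objective: simpler.

-- ===== PORT A =====
-- A's loop body: update the five summary counters
-- (credits_sent, jackpot_credits, transfers_successful, transfers_failed, total_retries)
-- for one result.  In this typing result.get("result", {}) is always a dict, so the
-- isinstance check is always true.  "success" truthiness: its int value ≠ 0.
def pvStepA (acc : Int × Int × Int × Int × Int) (result : List (String × List (String × Int))) :
    Int × Int × Int × Int × Int :=
  let rd : PySem.Dict String Int := ⟨PySem.Dict.getD ⟨result⟩ "result" []⟩
  let tr := acc.2.2.2.2 + PySem.Dict.getD rd "retries" 0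
  if PySem.Dict.getD rd "success" 0 ≠ 0 then
    (acc.1 + PySem.Dict.getD rd "credits_sent" 0,
     acc.2.1 + PySem.Dict.getD rd "jackpot_credits" 0,
     acc.2.2.1 + 1, acc.2.2.2.1, tr)
  else
    (acc.1, acc.2.1, acc.2.2.1, acc.2.2.2.1 + 1, tr)

def summarize_send_credits_results_py (successful_results : List (List (String × List (String × Int)))) : List (String × Int) :=
  let s := successful_results.foldl pvStepA (0, 0, 0, 0, 0)
  [("credits_sent", s.1), ("jackpot_credits", s.2.1),
   ("transfers_successful", s.2.2.1), ("transfers_failed", s.2.2.2.1),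
   ("total_retries", s.2.2.2.2)]

-- ===== PORT B =====
def summarize_send_credits_results_py_alt (successful_results : List (List (String × List (String × Int)))) : List (String × Int) :=
  let valid := successful_results.map
    (fun r => PySem.Dict.getD (⟨r⟩ : PySem.Dict String (List (String × Int))) "result" [])
  let successes := valid.filter
    (fun d => PySem.Dict.getD (⟨d⟩ : PySem.Dict String Int) "success" 0 != 0)
  [("credits_sent",
      (successes.map (fun d => PySem.Dict.getD (⟨d⟩ : PySem.Dict String Int) "credits_sent" 0)).sum),
   ("jackpot_credits",
      (successes.map (fun d => PySem.Dict.getD (⟨d⟩ : PySem.Dict String Int) "jackpot_credits" 0)).sum),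
   ("transfers_successful", (successes.length : Int)),
   ("transfers_failed", (valid.length : Int) - (successes.length : Int)),
   ("total_retries",
      (valid.map (fun d => PySem.Dict.getD (⟨d⟩ : PySem.Dict String Int) "retries" 0)).sum)]

-- ===== PRECONDITION & SPEC =====
def Spec_summarize_send_credits_results_py (successful_results : List (List (String × List (String × Int)))) (out : List (String × Int)) : Prop := out = summarize_send_credits_results_py_alt successful_results
instance (successful_results : List (List (String × List (String × Int)))) (out : List (String × Int)) : Decidable (Spec_summarize_send_credits_results_py successful_results out) := by unfold Spec_summarize_send_credits_results_py; infer_instance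

-- ===== CLAIM (what is proved, stated in full; the proofs are below) =====
def Claim_equal_summarize_send_credits_results_py : Prop := ∀ (successful_results : List (List (String × List (String × Int)))), Dom_summarize_send_credits_results_py successful_results → Spec_summarize_send_credits_results_py successful_results (summarize_send_credits_results_py successful_results)

-- ===== LEMMAS AND PROOFS =====

-- Proof-side abbreviations for B's aggregates.
def pvValid (sr : List (List (String × List (String × Int)))) : List (List (String × Int)) :=
  sr.map (fun r => PySem.Dict.getD (⟨r⟩ : PySem.Dict String (List (String × Int))) "result" [])

def pvSucc (sr : List (List (String × List (String × Int)))) : List (List (String × Int)) :=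
  (pvValid sr).filter (fun d => PySem.Dict.getD (⟨d⟩ : PySem.Dict String Int) "success" 0 != 0)

def pvSum (key : String) (l : List (List (String × Int))) : Int :=
  (l.map (fun d => PySem.Dict.getD (⟨d⟩ : PySem.Dict String Int) key 0)).sum

-- A's fold from an arbitrary accumulator, characterised by B's aggregates.
theorem pv_foldA_eq (sr : List (List (String × List (String × Int)))) (a b c d e : Int) :
    sr.foldl pvStepA (a, b, c, d, e) =
      (a + pvSum "credits_sent" (pvSucc sr),
       b + pvSum "jackpot_credits" (pvSucc sr),
       c + ((pvSucc sr).length : Int),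
       d + (((pvValid sr).length : Int) - ((pvSucc sr).length : Int)),
       e + pvSum "retries" (pvValid sr)) := by
  induction sr generalizing a b c d e with
  | nil => simp [pvValid, pvSucc, pvSum]
  | cons r rest ih =>
    simp only [List.foldl_cons, pvValid, pvSucc, pvSum, List.map_cons, List.filter_cons] at *
    by_cases h : PySem.Dict.getD (⟨PySem.Dict.getD (⟨r⟩ : PySem.Dict String (List (String × Int))) "result" []⟩ : PySem.Dict String Int) "success" 0 ≠ 0
    · rw [pvStepA, if_pos h, ih]
      simp only [bne_iff_ne, ne_eq, h, not_false_iff, if_pos, List.map_cons, List.sum_cons,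
        List.length_cons]
      push_cast
      exact Prod.ext (by ring) (Prod.ext (by ring) (Prod.ext (by ring) (Prod.ext (by ring) (by ring))))
    · rw [pvStepA, if_neg h]
      rw [not_not] at h
      rw [ih]
      simp only [h, bne_self_eq_false, Bool.false_eq_true, if_neg, List.length_cons, not_false_iff,
        List.sum_cons]
      push_cast
      exact Prod.ext (by ring) (Prod.ext (by ring) (Prod.ext (by ring) (Prod.ext (by ring) (by ring))))

-- ===== VERDICT (by name: the statement is the Claim_ definition above) =====
theorem summarize_send_credits_results_py_spec : Claim_equal_summarize_send_credits_results_py := by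
  intro sr _
  unfold Spec_summarize_send_credits_results_py
  unfold summarize_send_credits_results_py summarize_send_credits_results_py_alt
  rw [pv_foldA_eq]
  simp only [zero_add]
  rfl
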